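-- pv_equiv track=rewrite | github.com/iamrohit568/failing-build | failing-build/program.py | nested_maze_calculator
-- ===== SOURCE A (Python) =====
-- def nested_maze_calculator(data_list, depth_limit, multiplier):
--     """
--     Calculates an arbitrary "Maze Score."
--     This function is designed to have extremely high Cyclomatic Complexity
--     and a very low Maintainability Index due to excessive nesting and loops.
--     """
--     maze_score = 0
--
--     # 1. Outer Loop (Increases Complexity)
--     for i in range(len(data_list)):
--         current_item = data_list[i]
--
--         # 2. Outer Decision (Increases Complexity)
--         if current_item is not None and current_item > 0:
--
--             # 3. Intermediate Loop (Increases Complexity)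
--             j = 0
--             while j < depth_limit:
--
--                 # 4. Decision Nesting (Increases Complexity)
--                 if j % 2 == 0:
--                     maze_score += current_item * multiplier
--
--                     # 5. Inner Decision Branching (High Complexity)
--                     if i < 5 and j < 3:
--                         maze_score += 10
--                     elif i % 2 == 1:
--                         maze_score -= 5
--
--                         # 6. Deepest Loop (Increases Complexity)
--                         for k in range(j + 1):
--                             if k * i % 3 == 0:
--                                 maze_score += 1
--
--                                 # 7. Deepest Decision (Extremely High Complexity)
--                                 if k == 0 and i > 1:
--                                     maze_score += 50
--                                 else:
--                                     pass # Placeholder decision branch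
--                             else:
--                                 maze_score -= 1
--                     else:
--                         pass # Another placeholder decision branch
--
--                 # 8. Unrelated Decision (Increases Complexity)
--                 if current_item > 50 and multiplier < 2:
--                     maze_score //= 2
--
--                 j += 1
--
--         # 9. Final Decision Branch (Increases Complexity)
--         elif current_item is not None and current_item < 0:
--             maze_score += current_item * 2
--
--         # 10. Default Decision Branch (Increases Complexity)
--         else:
--             maze_score += 100
--
--     # 11. Final Cleanup Loop (Increases Complexity)
--     clean_count = 0
--     while clean_count < 2:
--         if maze_score < 0:
--             maze_score = 0
--         clean_count += 1
--
--     return maze_score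
-- ===== SOURCE B (Python) =====
-- def _even_step(score, item, multiplier, i, j):
--     # score update A performs at one even depth j (inner k-loop in closed form)
--     score += item * multiplier
--     if i < 5 and j < 3:
--         score += 10
--     elif i % 2 == 1:
--         c = j + 1 if i % 3 == 0 else j // 3 + 1
--         score += 2 * c - j - 6 + (50 if i > 1 else 0)
--     return score
--
-- def nested_maze_calculator(data_list, depth_limit, multiplier):
--     score = 0
--     for i, item in enumerate(data_list):
--         if item is None or item == 0:
--             score += 100
--         elif item < 0:
--             score += 2 * item
--         elif item > 50 and multiplier < 2:
--             # halving touches the running total, so walk every depth step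
--             for j in range(depth_limit):
--                 if j % 2 == 0:
--                     score = _even_step(score, item, multiplier, i, j)
--                 score //= 2
--         else:
--             # only even depths contribute: visit them directly
--             for j in range(0, depth_limit, 2):
--                 score = _even_step(score, item, multiplier, i, j)
--     return score if score > 0 else 0
-- ===== Notes on version B (the rewrite author's own statement) =====
-- stated objective: faster
-- what changed: B removes A's innermost k-loop via a closed-form count of k in [0,j] with (k*i)%3==0 and, when no halving of the score occurs, iterates only the even depth steps; intended as faster (a timing run measured B 20.8x faster at the largest size both finished).
import Mathlib
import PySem

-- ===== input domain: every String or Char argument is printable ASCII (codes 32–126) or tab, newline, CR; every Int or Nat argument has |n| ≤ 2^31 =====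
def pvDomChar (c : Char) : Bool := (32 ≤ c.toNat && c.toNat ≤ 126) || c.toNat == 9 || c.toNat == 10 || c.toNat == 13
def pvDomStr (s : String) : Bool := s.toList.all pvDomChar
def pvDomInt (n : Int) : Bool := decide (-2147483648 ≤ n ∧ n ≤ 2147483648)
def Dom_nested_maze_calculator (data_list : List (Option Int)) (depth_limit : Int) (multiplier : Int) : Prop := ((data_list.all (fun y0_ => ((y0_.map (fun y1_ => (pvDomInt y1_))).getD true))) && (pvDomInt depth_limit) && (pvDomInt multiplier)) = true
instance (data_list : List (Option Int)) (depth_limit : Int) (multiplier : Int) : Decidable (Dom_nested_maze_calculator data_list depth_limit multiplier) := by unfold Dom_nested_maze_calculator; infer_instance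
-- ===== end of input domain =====

-- B replaces A's innermost k-loop by a closed-form count and visits only the even depth
-- steps when no halving occurs; intended as faster (measured 20.8x at the largest size both finished).

-- ===== PORT A =====
-- innermost 'for k in range(j + 1)' loop of A
def pvA_kloop (i j s : Int) : Int :=
  (PySem.List.pyRange 0 (j + 1) 1).foldl (fun s k =>
    if PySem.Int.mod (k * i) 3 == 0 then
      let s := s + 1
      if k == 0 ∧ i > 1 then s + 50 else s
    else s - 1) s

-- one iteration of A's 'while j < depth_limit' loop (for item > 0)
def pvA_jstep (item mult i : Int) (s j : Int) : Int :=
  let s :=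
    if PySem.Int.mod j 2 == 0 then
      let s := s + item * mult
      if i < 5 ∧ j < 3 then s + 10
      else if PySem.Int.mod i 2 == 1 then pvA_kloop i j (s - 5)
      else s
    else s
  if item > 50 ∧ mult < 2 then PySem.Int.floordiv s 2 else s

-- body of A's outer 'for i in range(len(data_list))' loop
def pvA_item (d m : Int) (s : Int) (p : Int × Option Int) : Int :=
  match p.2 with
  | some v =>
      if v > 0 then (PySem.List.pyRange 0 d 1).foldl (pvA_jstep v m p.1) s
      else if v < 0 then s + v * 2
      else s + 100
  | none => s + 100

def nested_maze_calculator (data_list : List (Option Int)) (depth_limit : Int) (multiplier : Int) : Int :=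
  let s := (PySem.List.enumerate data_list).foldl (pvA_item depth_limit multiplier) 0
  -- final cleanup while-loop, unrolled (clean_count = 0, 1)
  let s := if s < 0 then 0 else s
  if s < 0 then 0 else s

-- ===== PORT B =====
-- Source B's _even_step: A's even-depth score update with the k-loop in closed form
def pvB_evenStep (s item mult i j : Int) : Int :=
  let s := s + item * mult
  if i < 5 ∧ j < 3 then s + 10
  else if PySem.Int.mod i 2 == 1 then
    let c := if PySem.Int.mod i 3 == 0 then j + 1 else PySem.Int.floordiv j 3 + 1
    s + (2 * c - j - 6 + (if i > 1 then 50 else 0))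
  else s

-- body of Source B's 'for i, item in enumerate(data_list)' loop
def pvB_item (d m : Int) (s : Int) (p : Int × Option Int) : Int :=
  match p.2 with
  | none => s + 100
  | some v =>
      if v == 0 then s + 100
      else if v < 0 then s + 2 * v
      else if v > 50 ∧ m < 2 then
        (PySem.List.pyRange 0 d 1).foldl (fun s j =>
          let s := if PySem.Int.mod j 2 == 0 then pvB_evenStep s v m p.1 j else s
          PySem.Int.floordiv s 2) s
      else
        (PySem.List.pyRange 0 d 2).foldl (fun s j => pvB_evenStep s v m p.1 j) s

def nested_maze_calculator_alt (data_list : List (Option Int)) (depth_limit : Int) (multiplier : Int) : Int :=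
  let s := (PySem.List.enumerate data_list).foldl (pvB_item depth_limit multiplier) 0
  if s > 0 then s else 0

-- ===== PRECONDITION & SPEC =====
def Spec_nested_maze_calculator (data_list : List (Option Int)) (depth_limit : Int) (multiplier : Int) (out : Int) : Prop := out = nested_maze_calculator_alt data_list depth_limit multiplier
instance (data_list : List (Option Int)) (depth_limit : Int) (multiplier : Int) (out : Int) : Decidable (Spec_nested_maze_calculator data_list depth_limit multiplier out) := by unfold Spec_nested_maze_calculator; infer_instance

-- ===== CLAIM (what is proved, stated in full; the proofs are below) =====
def Claim_equal_nested_maze_calculator : Prop := ∀ (data_list : List (Option Int)) (depth_limit : Int) (multiplier : Int), Dom_nested_maze_calculator data_list depth_limit multiplier → Spec_nested_maze_calculator data_list depth_limit multiplier (nested_maze_calculator data_list depth_limit multiplier)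


-- ===== LEMMAS AND PROOFS =====

theorem pv_dvd_mul_three (a i : Int) (hi : ¬ (3:Int) ∣ i) : (3:Int) ∣ a * i ↔ (3:Int) ∣ a := by
  constructor
  · intro h
    have h3 : ((3:Nat):Int) ∣ a * i := by exact_mod_cast h
    rcases Int.Prime.dvd_mul' Nat.prime_three h3 with h1 | h1
    · exact_mod_cast h1
    · exact absurd (by exact_mod_cast h1) hi
  · intro h; exact h.mul_right _

theorem pv_mod3_decide (a : Int) : (PySem.Int.mod a 3 == 0) = decide ((3:Int) ∣ a) := by
  by_cases h : (3:Int) ∣ a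
  · simp [h]
  · simp [h]

-- closed form of A's innermost k-loop, for a nonnegative depth index j = n
theorem pvA_kloop_closed (i s : Int) (n : Nat) :
    pvA_kloop i (n : Int) s =
      s + (2 * (if PySem.Int.mod i 3 == 0 then (n : Int) + 1 else (n : Int) / 3 + 1)
        - ((n : Int) + 1) + (if i > 1 then 50 else 0)) := by
  induction n with
  | zero =>
      unfold pvA_kloop
      rw [show ((0:Nat):Int) + 1 = 0 + 1 by norm_num, PySem.List.pyRange_one_singleton]
      simp only [List.foldl, pv_mod3_decide, zero_mul, dvd_zero, decide_true, if_true,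
        beq_self_eq_true, true_and, Nat.cast_zero]
      by_cases hi3 : (3:Int) ∣ i <;> simp [hi3] <;> split_ifs <;> omega
  | succ n ih =>
      unfold pvA_kloop at ih ⊢
      push_cast
      rw [show ((n:Int) + 1 + 1) = ((n:Int) + 1) + 1 by ring,
          PySem.List.pyRange_one_succ_right (by positivity), List.foldl_append, ih]
      simp only [List.foldl, pv_mod3_decide]
      have hk0 : (((n:Int) + 1) == 0) = false := by simp; omega
      by_cases hi3 : (3:Int) ∣ i
      · have : (3:Int) ∣ ((n:Int)+1) * i := Dvd.dvd.mul_left hi3 _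
        simp only [this, decide_true, if_true, hk0, Bool.false_eq_true, false_and, if_false, hi3]
        split_ifs <;> omega
      · have hdec : decide ((3:Int) ∣ ((n:Int)+1) * i) = decide ((3:Int) ∣ ((n:Int)+1)) :=
          decide_eq_decide.mpr (pv_dvd_mul_three _ _ hi3)
        simp only [hdec, hi3, decide_false, Bool.false_eq_true, if_false]
        by_cases hd : (3:Int) ∣ ((n:Int)+1)
        · have h13 : ((n:Int)+1)/3 = (n:Int)/3 + 1 := by omega
          simp only [hd, decide_true, if_true, hk0, Bool.false_eq_true, false_and, if_false, h13]
          split_ifs <;> omega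
        · have h13 : ((n:Int)+1)/3 = (n:Int)/3 := by omega
          simp only [hd, decide_false, Bool.false_eq_true, if_false, h13]
          split_ifs <;> omega

-- A's even-depth update equals Source B's _even_step
theorem pvA_even_eq (item mult i s : Int) (n : Nat) :
    (let s := s + item * mult
     if i < 5 ∧ (n : Int) < 3 then s + 10
     else if PySem.Int.mod i 2 == 1 then pvA_kloop i (n : Int) (s - 5)
     else s) = pvB_evenStep s item mult i (n : Int) := by
  simp only [pvB_evenStep]
  by_cases h1 : i < 5 ∧ (n : Int) < 3
  · simp [h1]
  · simp only [h1, if_false]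
    by_cases h2 : (PySem.Int.mod i 2 == 1) = true
    · simp only [h2, if_true, pvA_kloop_closed,
        PySem.Int.floordiv_eq_ediv_of_pos (show (0:Int) < 3 by norm_num)]
      split_ifs <;> ring
    · simp only [h2, Bool.false_eq_true, if_false]

theorem pvRange2_nil (d : Int) (hd : d ≤ 0) : PySem.List.pyRange 0 d 2 = [] := by
  rw [PySem.List.pyRange_of_pos _ _ (show (0:Int) < 2 by norm_num)]
  simp [show ¬ (0:Int) < d by omega]

-- step-2 range grows by [n] exactly when n is even
theorem pvRange2_succ (n : Nat) :
    PySem.List.pyRange 0 ((n : Int) + 1) 2 =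
      PySem.List.pyRange 0 (n : Int) 2 ++ (if n % 2 = 0 then [(n : Int)] else []) := by
  rw [PySem.List.pyRange_of_pos _ _ (show (0:Int) < 2 by norm_num),
      PySem.List.pyRange_of_pos _ _ (show (0:Int) < 2 by norm_num)]
  cases n with
  | zero => norm_num
  | succ k =>
      have h1 : (0:Int) < (k:Int) + 1 + 1 := by positivity
      have h2 : (0:Int) < ((k+1:Nat):Int) := by positivity
      push_cast
      simp only [if_pos h1, if_pos (by push_cast at h2 ⊢; omega : (0:Int) < (k:Int)+1), sub_zero]
      by_cases he : (k+1) % 2 = 0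
      · have ha : (((k:Int)+1+1+2-1)/2).toNat = (((k:Int)+1+2-1)/2).toNat + 1 := by omega
        have hel : 0 + 2 * (((((k:Int)+1+2-1)/2).toNat : Nat) : Int) = (k:Int)+1 := by
          have : ((((k:Int)+1+2-1)/2).toNat : Int) = ((k:Int)+2)/2 := by omega
          rw [this]; omega
        rw [ha, List.range_succ, List.map_append]
        simp only [he, if_pos, List.map_cons, List.map_nil, hel]
      · have ha : (((k:Int)+1+1+2-1)/2).toNat = (((k:Int)+1+2-1)/2).toNat := by omega
        rw [ha]
        simp [he]

-- parity of the loop counter as PySem sees it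
theorem pv_mod2_nat (n : Nat) : (PySem.Int.mod (n : Int) 2 == 0) = decide (n % 2 = 0) := by
  rw [PySem.Int.mod_eq_emod_of_pos (show (0:Int) < 2 by norm_num)]
  by_cases h : n % 2 = 0 <;> simp [h] <;> omega

-- non-halving case: A's full j-loop equals B's even-j loop
theorem pv_loop_nohalve (v m i : Int) (hnh : ¬(v > 50 ∧ m < 2)) (d s : Int) :
    (PySem.List.pyRange 0 d 1).foldl (pvA_jstep v m i) s =
      (PySem.List.pyRange 0 d 2).foldl (fun s j => pvB_evenStep s v m i j) s := by
  by_cases hd : d ≤ 0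
  · rw [PySem.List.pyRange_one_eq_nil hd, pvRange2_nil d hd]; rfl
  · obtain ⟨n, rfl⟩ : ∃ n : Nat, d = (n : Int) := ⟨d.toNat, by omega⟩
    clear hd
    induction n generalizing s with
    | zero =>
        rw [show ((0:Nat):Int) = 0 by norm_num, PySem.List.pyRange_one_eq_nil le_rfl,
          pvRange2_nil 0 le_rfl]
        rfl
    | succ n ih =>
        push_cast
        rw [PySem.List.pyRange_one_succ_right (by positivity), List.foldl_append, ih,
          pvRange2_succ n, List.foldl_append]
        by_cases he : n % 2 = 0
        · simp only [he, if_pos, List.foldl]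
          simp only [pvA_jstep, pv_mod2_nat, he, decide_true, if_true, hnh, if_false]
          exact pvA_even_eq v m i _ n
        · simp only [he, List.foldl]
          simp only [pvA_jstep, pv_mod2_nat, he, decide_false, Bool.false_eq_true, if_false,
            hnh]
          simp

-- halving case: the two j-loop bodies agree on every j of the range
theorem pv_loop_halve (v m i : Int) (hh : v > 50 ∧ m < 2) (d s : Int) :
    (PySem.List.pyRange 0 d 1).foldl (pvA_jstep v m i) s =
      (PySem.List.pyRange 0 d 1).foldl (fun s j =>
        let s := if PySem.Int.mod j 2 == 0 then pvB_evenStep s v m i j else s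
        PySem.Int.floordiv s 2) s := by
  apply PySem.List.foldl_congr_mem
  intro acc x hx
  obtain ⟨n, rfl⟩ : ∃ n : Nat, x = (n : Int) :=
    ⟨x.toNat, by have := (PySem.List.mem_pyRange_one.mp hx).1; omega⟩
  simp only [pvA_jstep, hh, if_true, and_self]
  by_cases he : n % 2 = 0
  · simp only [pv_mod2_nat, he, decide_true, if_true]
    rw [pvA_even_eq v m i acc n]
  · simp only [pv_mod2_nat, he, decide_false, Bool.false_eq_true, if_false]

theorem pv_item_eq (d m : Int) : pvA_item d m = pvB_item d m := by
  funext s p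
  obtain ⟨idx, o⟩ := p
  cases o with
  | none => rfl
  | some v =>
      simp only [pvA_item, pvB_item]
      rcases lt_trichotomy v 0 with hv | hv | hv
      · simp only [if_neg (by omega : ¬ v > 0), if_pos hv,
          if_neg (by simp; omega : ¬ (v == 0) = true)]
        ring
      · subst hv; norm_num
      · simp only [if_pos hv, if_neg (by simp; omega : ¬ (v == 0) = true),
          if_neg (by omega : ¬ v < 0)]
        by_cases hh : v > 50 ∧ m < 2
        · simp only [if_pos hh]
          exact pv_loop_halve v m idx hh d s
        · simp only [if_neg hh]
          exact pv_loop_nohalve v m idx hh d s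

-- ===== VERDICT (by name: the statement is the Claim_ definition above) =====
theorem nested_maze_calculator_spec : Claim_equal_nested_maze_calculator := by
  intro dl d m _
  unfold Spec_nested_maze_calculator nested_maze_calculator nested_maze_calculator_alt
  rw [pv_item_eq]
  set t := (PySem.List.enumerate dl).foldl (pvB_item d m) 0 with ht
  simp only []
  split_ifs <;> omega
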